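-- pv_equiv track=rewrite | github.com/habenamare/algorithm-analysis-assignment | 01-arrays.py | is_dual
-- ===== SOURCE A (Python) =====
-- def is_dual(a, length):
--    if length % 2 != 0:
--       # since array should have even number of elements
--       return False
--
--    if length == 0:
--       return True
--
--    first_pair_sum = a[0] + a[1]
--
--    for i in range(2, length, 2):
--       current_pair_sum = a[i] + a[i+1]
--       if current_pair_sum != first_pair_sum:
--          return False
--
--    return True
-- ===== SOURCE B (Python) =====
-- def is_dual(a, length):
--     if length % 2 != 0:
--         return False
--
--     def pair_sum(k):
--         return a[2 * k] + a[2 * k + 1]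
--
--     def same(lo, hi):
--         # all pair sums with pair index in [lo, hi) are equal (divide and conquer;
--         # correctness follows from transitivity of equality across the split boundary)
--         if hi - lo <= 1:
--             return True
--         mid = (lo + hi) // 2
--         return same(lo, mid) and same(mid, hi) and pair_sum(mid - 1) == pair_sum(mid)
--
--     return same(0, length // 2)
-- ===== Notes on version B (the rewrite author's own statement) =====
-- stated objective: alternative
-- what changed: Replaces A's left-to-right loop comparing every pair sum against the first pair's sum by a divide-and-conquer recursion: each half is checked recursively and the two halves are joined by comparing the pair sums adjacent to the split, correct by transitivity of equality.
-- outside the precondition, e.g. on is_dual([1, 2, 3, 4], 6): A returns False, B raises IndexError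
import Mathlib
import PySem

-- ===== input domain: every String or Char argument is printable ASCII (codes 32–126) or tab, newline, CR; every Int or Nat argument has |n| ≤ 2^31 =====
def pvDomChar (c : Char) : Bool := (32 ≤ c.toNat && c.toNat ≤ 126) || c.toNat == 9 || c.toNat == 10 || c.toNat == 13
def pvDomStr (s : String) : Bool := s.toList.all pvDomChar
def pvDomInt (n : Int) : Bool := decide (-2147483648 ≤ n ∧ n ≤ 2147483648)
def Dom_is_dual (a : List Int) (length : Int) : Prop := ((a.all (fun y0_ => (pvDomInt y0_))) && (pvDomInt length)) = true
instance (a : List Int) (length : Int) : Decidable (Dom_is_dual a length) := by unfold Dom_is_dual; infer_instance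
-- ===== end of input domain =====

-- B replaces A's left-to-right compare-against-first-pair loop by a divide-and-conquer
-- recursion joining halves at the split boundary (objective: alternative; equal cost).


-- ===== PORT A =====
-- the 'for i in range(2, length, 2)' loop with its early 'return False';
-- the catch-all branch is Python's IndexError, excluded by Pre_is_dual
def isDualLoopA (a : List Int) (fps : Int) : List Int → Bool
  | [] => true
  | i :: rest =>
    match PySem.List.pyGet? a i, PySem.List.pyGet? a (i + 1) with
    | some x, some y => if x + y ≠ fps then false else isDualLoopA a fps rest
    | _, _ => false

def is_dual (a : List Int) (length : Int) : Bool :=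
  if length % 2 ≠ 0 then false
  else if length = 0 then true
  else
    match PySem.List.pyGet? a 0, PySem.List.pyGet? a 1 with
    | some x, some y => isDualLoopA a (x + y) (PySem.List.pyRange 2 length 2)
    | _, _ => false  -- IndexError, excluded by Pre_is_dual

-- ===== PORT B =====
-- pair_sum(k) = a[2*k] + a[2*k+1]; none = Python's IndexError (excluded by Pre_is_dual)
def pairSumB (a : List Int) (k : Int) : Option Int :=
  match PySem.List.pyGet? a (2 * k), PySem.List.pyGet? a (2 * k + 1) with
  | some x, some y => some (x + y)
  | _, _ => none

-- same(lo, hi): divide and conquer over the pair indices in [lo, hi)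
def sameB (a : List Int) (lo hi : Int) : Bool :=
  if hi - lo ≤ 1 then true
  else
    let mid := PySem.Int.floordiv (lo + hi) 2
    sameB a lo mid && sameB a mid hi &&
      (match pairSumB a (mid - 1), pairSumB a mid with
       | some s, some t => s == t
       | _, _ => false)  -- IndexError, excluded by Pre_is_dual
termination_by (hi - lo).toNat
decreasing_by
  all_goals
    rw [PySem.Int.floordiv_eq_ediv_of_pos (by norm_num : (0:Int) < 2)]
    omega

def is_dual_alt (a : List Int) (length : Int) : Bool :=
  if length % 2 ≠ 0 then false
  else sameB a 0 (PySem.Int.floordiv length 2)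

-- ===== PRECONDITION & SPEC =====
-- Pre_ excludes the inputs with insufficient elements on which the pair accesses a[2k]/a[2k+1]
-- raise IndexError (in A, in B, or in both): for even length ≥ 0 it requires length ≤ len(a)
-- (A can also early-return False before reaching the missing element, and B's boundary
-- comparisons can reach a missing element before the mismatch A reports); for even
-- length < 0 it requires len(a) ≥ 2 (A unconditionally evaluates a[0]+a[1]).
def Pre_is_dual (a : List Int) (length : Int) : Prop :=
  length % 2 = 0 → (if 0 ≤ length then length ≤ (a.length : Int) else 2 ≤ (a.length : Int))
instance (a : List Int) (length : Int) : Decidable (Pre_is_dual a length) := by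
  unfold Pre_is_dual; infer_instance

def pvWitness_is_dual : List Int × Int := ([1, 2, 3, 0], 4)

def Spec_is_dual (a : List Int) (length : Int) (out : Bool) : Prop := out = is_dual_alt a length
instance (a : List Int) (length : Int) (out : Bool) : Decidable (Spec_is_dual a length out) := by
  unfold Spec_is_dual; infer_instance

-- ===== CLAIM =====
def Claim_equal_is_dual : Prop := ∀ (a : List Int) (length : Int), Dom_is_dual a length →
  Pre_is_dual a length → Spec_is_dual a length (is_dual a length)

-- ===== LEMMAS AND PROOFS =====

-- pair sum number m (0-based), as a total function on in-range indices
def pairS (a : List Int) (m : Nat) : Int := a.getD (2*m) 0 + a.getD (2*m+1) 0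

theorem pyGet?_of_inrange (a : List Int) (i : Int) (h0 : 0 ≤ i) (h1 : i < (a.length : Int)) :
    PySem.List.pyGet? a i = some (a.getD i.toNat 0) := by
  simp [PySem.List.pyGet?, PySem.List.pyIdx?, h0, h1]

theorem pairSumB_of_inrange (a : List Int) (k : Int) (h0 : 0 ≤ k)
    (h1 : 2*k + 1 < (a.length : Int)) :
    pairSumB a k = some (pairS a k.toNat) := by
  unfold pairSumB
  rw [pyGet?_of_inrange a (2*k) (by omega) (by omega),
    pyGet?_of_inrange a (2*k+1) (by omega) h1]
  have e1 : (2*k).toNat = 2*k.toNat := by omega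
  have e2 : (2*k+1).toNat = 2*k.toNat + 1 := by omega
  rw [e1, e2]
  rfl

theorem loopA_eq_all (a : List Int) (fps : Int) (l : List Int)
    (hl : ∀ i ∈ l, 0 ≤ i ∧ i + 1 < (a.length : Int)) :
    isDualLoopA a fps l = l.all (fun i => (a.getD i.toNat 0 + a.getD (i + 1).toNat 0) == fps) := by
  induction l with
  | nil => rfl
  | cons i rest ih =>
    obtain ⟨h0, h1⟩ := hl i (by simp)
    rw [isDualLoopA, pyGet?_of_inrange a i h0 (by omega), pyGet?_of_inrange a (i+1) (by omega) h1,
      List.all_cons, ih (fun j hj => hl j (by simp [hj]))]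
    by_cases hne : a.getD i.toNat 0 + a.getD (i + 1).toNat 0 = fps <;>
      [skip; skip] <;> (simp only [List.getD_eq_getElem?_getD] at hne; simp [hne])

-- sameB a lo hi decides whether all neighbouring pair sums in [lo, hi) agree
theorem sameB_iff (a : List Int) (n : Nat) : ∀ (lo hi : Int), (hi - lo).toNat ≤ n → 0 ≤ lo →
    2*hi ≤ (a.length : Int) →
    (sameB a lo hi = true ↔
      ∀ k : Int, lo ≤ k → k + 2 ≤ hi → pairS a k.toNat = pairS a (k+1).toNat) := by
  induction n with
  | zero =>
    intro lo hi hn hlo hhi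
    rw [sameB, if_pos (by omega)]
    constructor
    · intro _ k hk1 hk2; exact absurd hk2 (by omega)
    · intro _; rfl
  | succ n ih =>
    intro lo hi hn hlo hhi
    rw [sameB]
    by_cases hbase : hi - lo ≤ 1
    · rw [if_pos hbase]
      constructor
      · intro _ k hk1 hk2; exact absurd hk2 (by omega)
      · intro _; rfl
    · rw [if_neg hbase]
      have hmide : PySem.Int.floordiv (lo + hi) 2 = (lo + hi) / 2 :=
        PySem.Int.floordiv_eq_ediv_of_pos (by norm_num)
      set mid := PySem.Int.floordiv (lo + hi) 2 with hmiddef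
      have h1 : lo + 1 ≤ mid := by omega
      have h2 : mid ≤ hi - 1 := by omega
      simp only [Bool.and_eq_true]
      rw [ih lo mid (by omega) hlo (by omega), ih mid hi (by omega) (by omega) hhi,
        pairSumB_of_inrange a (mid-1) (by omega) (by omega),
        pairSumB_of_inrange a mid (by omega) (by omega)]
      have ebd : (mid - 1 + 1 : Int) = mid := by ring
      constructor
      · intro h k hk1 hk2
        obtain ⟨⟨hL, hR⟩, hB⟩ := h
        rw [beq_iff_eq] at hB
        by_cases hkm : k + 2 ≤ mid
        · exact hL k hk1 hkm
        · by_cases hk2m : mid ≤ k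
          · exact hR k hk2m hk2
          · have hk : k = mid - 1 := by omega
            subst hk
            rw [ebd]
            exact hB
      · intro h
        refine ⟨⟨fun k hk1 hk2 => h k hk1 (by omega), fun k hk1 hk2 => h k (by omega) hk2⟩, ?_⟩
        rw [beq_iff_eq]
        have := h (mid - 1) (by omega) (by omega)
        rwa [ebd] at this
      
-- the neighbour-chain condition is equivalent to A's compare-to-first condition
theorem chain_iff_first (a : List Int) (p : Nat) :
    (∀ k : Int, 0 ≤ k → k + 2 ≤ (p:Int) → pairS a k.toNat = pairS a (k+1).toNat) ↔
    (∀ k : Nat, k < p - 1 → pairS a (k+1) = pairS a 0) := by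
  constructor
  · intro h
    have aux : ∀ k : Nat, k < p → pairS a k = pairS a 0 := by
      intro k
      induction k with
      | zero => intro _; rfl
      | succ k ihk =>
        intro hk
        have h1 := h (k:Int) (by omega) (by omega)
        have e1 : ((k:Int)).toNat = k := by omega
        have e2 : ((k:Int)+1).toNat = k+1 := by omega
        rw [e1, e2] at h1
        rw [← h1]
        exact ihk (by omega)
    intro k hk
    exact aux (k+1) (by omega)
  · intro h k hk0 hk2
    have e : (k+1).toNat = k.toNat + 1 := by omega
    have h2 : pairS a (k.toNat + 1) = pairS a 0 := h k.toNat (by omega)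
    rw [e, h2]
    rcases Nat.eq_zero_or_pos k.toNat with h0 | hpos
    · rw [h0]
    · have h3 := h (k.toNat - 1) (by omega)
      rw [show k.toNat - 1 + 1 = k.toNat by omega] at h3
      exact h3

theorem main (a : List Int) (length : Int)
    (hpre : length % 2 = 0 → (if 0 ≤ length then length ≤ (a.length : Int) else 2 ≤ (a.length : Int))) :
    is_dual a length = is_dual_alt a length := by
  unfold is_dual is_dual_alt
  by_cases he : length % 2 = 0
  · simp only [he, ne_eq, not_true_eq_false, not_false_eq_true, if_neg]
    have hfd : PySem.Int.floordiv length 2 = length / 2 :=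
      PySem.Int.floordiv_eq_ediv_of_pos (by norm_num)
    by_cases hz : length = 0
    · subst hz
      rw [if_pos rfl, hfd]
      rw [show (0:Int)/2 = 0 by norm_num, sameB, if_pos (by norm_num)]
    · rw [if_neg hz]
      by_cases hneg : 0 ≤ length
      · have hlen : length ≤ (a.length : Int) := by have := hpre he; rwa [if_pos hneg] at this
        obtain ⟨p, hp, hp1⟩ : ∃ p : Nat, length = 2 * (p : Int) ∧ 1 ≤ p := by
          refine ⟨length.toNat / 2, by omega, by omega⟩
        have hr2 : PySem.List.pyRange 2 length 2 = (List.range (p-1)).map (fun k : Nat => (2:Int) + 2 * (k:Int)) := by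
          rw [PySem.List.pyRange_of_pos 2 length (by norm_num : (0:Int) < 2)]
          by_cases h2l : 2 < length
          · have hc : ((length - 2 + 2 - 1) / 2).toNat = p - 1 := by omega
            rw [if_pos h2l, hc]
          · have hc : p - 1 = 0 := by omega
            rw [if_neg h2l, hc]
        rw [pyGet?_of_inrange a 0 (by omega) (by omega), pyGet?_of_inrange a 1 (by omega) (by omega)]
        rw [hr2]
        dsimp only
        rw [loopA_eq_all a _ _ (by
          intro i hi
          simp only [List.mem_map, List.mem_range] at hi
          obtain ⟨k, hk, rfl⟩ := hi
          omega)]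
        have hfp : PySem.Int.floordiv length 2 = (p:Int) := by rw [hfd]; omega
        rw [hfp, Bool.eq_iff_iff,
          sameB_iff a p 0 (p:Int) (by omega) le_rfl (by omega), chain_iff_first a p]
        rw [List.all_eq_true]
        constructor
        · intro hL k hk
          have := hL _ (List.mem_map.mpr ⟨k, List.mem_range.mpr hk, rfl⟩)
          rw [beq_iff_eq] at this
          rw [show ((2:Int) + 2*(k:Int)).toNat = 2*(k+1) by omega,
            show ((2:Int) + 2*(k:Int) + 1).toNat = 2*(k+1)+1 by omega,
            show (Int.toNat 0) = 2*0 from rfl, show (Int.toNat 1) = 2*0+1 from rfl] at this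
          exact this
        · intro hR y hy
          rw [List.mem_map] at hy
          obtain ⟨k, hk, rfl⟩ := hy
          rw [List.mem_range] at hk
          have := hR k hk
          unfold pairS at this
          rw [beq_iff_eq,
            show ((2:Int) + 2*(k:Int)).toNat = 2*(k+1) by omega,
            show ((2:Int) + 2*(k:Int) + 1).toNat = 2*(k+1)+1 by omega,
            show (Int.toNat 0) = 2*0 from rfl, show (Int.toNat 1) = 2*0+1 from rfl]
          exact this
      · -- negative even length: A's range is empty, B's pair-index interval is empty
        have hlen : 2 ≤ (a.length : Int) := by have := hpre he; rw [if_neg hneg] at this; exact this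
        rw [pyGet?_of_inrange a 0 (by omega) (by omega), pyGet?_of_inrange a 1 (by omega) (by omega)]
        rw [show PySem.List.pyRange 2 length 2 = [] by
          rw [PySem.List.pyRange_of_pos 2 length (by norm_num : (0:Int) < 2)]
          simp [show ¬ (2 < length) by omega]]
        rw [sameB, if_pos (by rw [hfd]; omega)]
        rfl
  · simp [he]

-- ===== VERDICT =====
theorem is_dual_spec : Claim_equal_is_dual := by
  intro a length _ hpre
  show is_dual a length = is_dual_alt a length
  exact main a length hpre
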